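-- pv_equiv track=rewrite | github.com/harshavardhinichunduru/photoshare-backend | Invoice_Validation.py | convert_content
-- ===== SOURCE A (Python) =====
-- def convert_content(input_text):
--     # Split the input text into lines
--     lines = input_text.strip().split('\n')
--     # Process each line
--     processed_lines = []
--     tmp_lines=[]
--     tmp=""
--     for line in lines:
--         # Remove any trailing whitespace and newlines
--         clean_line = line.strip()
--         if clean_line.find(')') != -1:  # If there'
--             tmp_lines.append(clean_line)
--             for l in tmp_lines:
--                 if l.find(')') != -1:
--                     tmp = tmp + l
--                 else:
--                     tmp = tmp + l + '||'
--             tmp_lines.clear()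
--             if tmp[-3:] == '||)':
--                 tmp = tmp[:-3] + ')'
--             processed_lines.append(tmp.strip())
--             tmp=""
--         else:
--             tmp_lines.append(clean_line)
--
--         # Replace newlines within the parentheses with '||'
--         # processed_line = clean_line.replace('\n', '||')
--         # processed_lines.append(processed_line)
--     # return '\n'.join(processed_lines)
--     return (processed_lines)
-- ===== SOURCE B (Python) =====
-- def convert_content(input_text):
--     # Work on ONE flat string: strip each line, rejoin with '\n', then repeatedly
--     # scan for the first ')' character, cut the text at the end of that line,
--     # and turn the cut-off piece into a record ('\n' -> '||', collapse a '||)'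
--     # tail, strip).  Text left after the last ')' line is dropped.
--     text = '\n'.join(l.strip() for l in input_text.strip().split('\n'))
--     out = []
--     while True:
--         p = text.find(')')
--         if p == -1:
--             return out
--         nl = text.find('\n', p)
--         end = nl if nl != -1 else len(text)
--         rec = text[:end].replace('\n', '||')
--         if rec.endswith('||)'):
--             rec = rec[:-3] + ')'
--         out.append(rec.strip())
--         text = text[end + 1:]
-- ===== Notes on version B (the rewrite author's own statement) =====
-- stated objective: alternative
-- what changed: Replaces A's per-line loop with a buffer list, an inner join loop and a flush on each ')' line by a substring-scanning algorithm: the stripped lines are flattened into one '\n'-joined string and a while loop repeatedly locates the first ')' with str.find, cuts the text at that line's end, and formats the cut piece with str.replace.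
import Mathlib
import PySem

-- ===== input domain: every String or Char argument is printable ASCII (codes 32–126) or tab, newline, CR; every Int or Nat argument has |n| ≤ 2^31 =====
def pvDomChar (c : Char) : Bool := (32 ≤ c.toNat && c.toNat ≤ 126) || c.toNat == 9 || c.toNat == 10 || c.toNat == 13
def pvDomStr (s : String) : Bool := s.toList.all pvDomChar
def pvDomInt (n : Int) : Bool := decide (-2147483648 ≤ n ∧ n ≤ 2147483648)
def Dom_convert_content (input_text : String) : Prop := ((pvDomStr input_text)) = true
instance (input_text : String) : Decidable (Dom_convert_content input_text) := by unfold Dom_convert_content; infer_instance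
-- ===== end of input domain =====

-- B replaces A's per-line buffer/flush loop by a substring-scanning while loop over
-- the flattened '\n'-joined text (find ')'; cut at end of that line; replace '\n'
-- by '||'); same output, a different algorithm of similar cost.

-- ===== PORT A =====
-- state: (processed_lines, tmp_lines, tmp); strings kept as List Char via PySem.Chars
def convert_content (input_text : String) : List String :=
  let lines := PySem.Chars.splitOn (PySem.Chars.strip input_text.toList) ['\n']
  let r := lines.foldl (fun (st : List (List Char) × List (List Char) × List Char) line =>
    let clean := PySem.Chars.strip line
    if PySem.Chars.find clean [')'] ≠ -1 then
      let tmpLines := st.2.1 ++ [clean]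
      let tmp := tmpLines.foldl (fun t l =>
        if PySem.Chars.find l [')'] ≠ -1 then t ++ l else t ++ l ++ ['|','|']) st.2.2
      let tmp := if PySem.List.slice tmp (some (-3)) none = ['|','|',')'] then
          PySem.List.slice tmp none (some (-3)) ++ [')'] else tmp
      (st.1 ++ [PySem.Chars.strip tmp], ([] : List (List Char)), ([] : List Char))
    else
      (st.1, st.2.1 ++ [clean], st.2.2)) ([], [], [])
  r.1.map String.ofList

-- ===== PORT B =====
-- the while loop of Source B; fuel only makes the recursion structural (text shrinks by
-- at least one character per iteration, so fuel = text.length + 1 is never exhausted)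
def pvScanB (fuel : Nat) (text : List Char) (out : List String) : List String :=
  match fuel with
  | 0 => out
  | fuel + 1 =>
    let p := PySem.Chars.find text [')']
    if p = -1 then out
    else
      let nl := PySem.Chars.findFrom text ['\n'] p none
      let e : Int := if nl ≠ -1 then nl else (text.length : Int)
      let rec1 := PySem.Chars.replace (PySem.List.slice text none (some e)) ['\n'] ['|','|']
      let rec2 := if PySem.Chars.endswith rec1 ['|','|',')'] then
          PySem.List.slice rec1 none (some (-3)) ++ [')'] else rec1
      pvScanB fuel (PySem.List.slice text (some (e + 1)) none)
        (out ++ [String.ofList (PySem.Chars.strip rec2)])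

def convert_content_alt (input_text : String) : List String :=
  let text := PySem.Chars.join ['\n']
    ((PySem.Chars.splitOn (PySem.Chars.strip input_text.toList) ['\n']).map PySem.Chars.strip)
  pvScanB (text.length + 1) text []

-- ===== PRECONDITION & SPEC =====
def Spec_convert_content (input_text : String) (out : List String) : Prop := out = convert_content_alt input_text
instance (input_text : String) (out : List String) : Decidable (Spec_convert_content input_text out) := by unfold Spec_convert_content; infer_instance

-- ===== CLAIM (what is proved, stated in full; the proofs are below) =====
def Claim_equal_convert_content : Prop := ∀ (input_text : String), Dom_convert_content input_text → Spec_convert_content input_text (convert_content input_text)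


-- ===== LEMMAS AND PROOFS =====

-- the common per-group formatting ('||'-join, '||)' tail fixup, strip)
def pvFmt (g : List (List Char)) : List Char :=
  let record := PySem.Chars.join ['|','|'] g
  let record := if PySem.Chars.endswith record ['|','|',')'] then
      PySem.List.slice record none (some (-3)) ++ [')'] else record
  PySem.Chars.strip record

-- the grouping of (already stripped) lines: buffer until a line containing ')'
def pvGrpStep (st : List (List (List Char)) × List (List Char)) (l : List Char) :
    List (List (List Char)) × List (List Char) :=
  let cur := st.2 ++ [l]
  if PySem.Chars.find l [')'] ≠ -1 then (st.1 ++ [cur], []) else (st.1, cur)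

def pvGrp (ls : List (List Char)) : List (List (List Char)) × List (List Char) :=
  ls.foldl pvGrpStep ([], [])

-- A's slice-based tail test equals B's endswith test
lemma pv_slice_eq_endswith (cs : List Char) :
    (PySem.List.slice cs (some (-3)) none = ['|','|',')'])
      ↔ (PySem.Chars.endswith cs ['|','|',')'] = true) := by
  rw [PySem.List.slice_from_neg_ofNat cs 3 (by omega), PySem.Chars.endswith_iff]
  constructor
  · intro h; rw [← h]; exact List.drop_suffix _ _
  · intro h
    obtain ⟨t, ht⟩ := h
    subst ht
    simp

-- A's inner concatenation loop equals '||'.join, when only the last line has ')'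
lemma pv_inner_join (buf : List (List Char)) (clean : List Char)
    (hbuf : ∀ l ∈ buf, PySem.Chars.find l [')'] = -1)
    (hc : PySem.Chars.find clean [')'] ≠ -1) :
    (buf ++ [clean]).foldl (fun t l =>
        if PySem.Chars.find l [')'] ≠ -1 then t ++ l else t ++ l ++ ['|','|']) []
      = PySem.Chars.join ['|','|'] (buf ++ [clean]) := by
  have hfun : (fun (t l : List Char) =>
      if PySem.Chars.find l [')'] ≠ -1 then t ++ l else t ++ l ++ ['|','|'])
      = (fun t l => t ++ (if PySem.Chars.find l [')'] ≠ -1 then l else l ++ ['|','|'])) := by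
    funext t l; split <;> simp
  rw [hfun, PySem.List.foldl_append_eq_flatMap, List.nil_append]
  induction buf with
  | nil => simp [PySem.Chars.join_singleton, hc]
  | cons l rest ih =>
    have hl : PySem.Chars.find l [')'] = -1 := hbuf l (by simp)
    have hrest : ∀ x ∈ rest, PySem.Chars.find x [')'] = -1 := fun x hx => hbuf x (by simp [hx])
    rw [List.cons_append, List.flatMap_cons, ih hrest]
    have hne : rest ++ [clean] ≠ [] := by simp
    obtain ⟨q, qs, hq⟩ := List.exists_cons_of_ne_nil hne
    rw [hq, PySem.Chars.join_cons_cons]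
    simp [hl]

-- A's flush-on-')' fold equals map pvFmt over the grouping of the stripped lines
lemma pv_loopA (ls : List (List Char)) (gs : List (List (List Char))) (buf : List (List Char))
    (hbuf : ∀ l ∈ buf, PySem.Chars.find l [')'] = -1) :
    (ls.foldl (fun (st : List (List Char) × List (List Char) × List Char) line =>
      if PySem.Chars.find line [')'] ≠ -1 then
        let tmpLines := st.2.1 ++ [line]
        let tmp := tmpLines.foldl (fun t l =>
          if PySem.Chars.find l [')'] ≠ -1 then t ++ l else t ++ l ++ ['|','|']) st.2.2
        let tmp := if PySem.List.slice tmp (some (-3)) none = ['|','|',')'] then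
            PySem.List.slice tmp none (some (-3)) ++ [')'] else tmp
        (st.1 ++ [PySem.Chars.strip tmp], ([] : List (List Char)), ([] : List Char))
      else
        (st.1, st.2.1 ++ [line], st.2.2)) (gs.map pvFmt, buf, [])).1
    = ((ls.foldl pvGrpStep (gs, buf)).1).map pvFmt := by
  induction ls generalizing gs buf with
  | nil => simp
  | cons line rest ih =>
    simp only [List.foldl_cons]
    by_cases hp : PySem.Chars.find line [')'] = -1
    · simp only [pvGrpStep, hp, ne_eq, not_true_eq_false, if_false]
      exact ih gs (buf ++ [line])
        (by intro l hl; rcases List.mem_append.mp hl with h | h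
            · exact hbuf l h
            · simp at h; subst h; exact hp)
    · simp only [pvGrpStep, hp, ne_eq, not_false_eq_true, if_true]
      have hflush : PySem.Chars.strip
          (if PySem.List.slice ((buf ++ [line]).foldl (fun t l =>
              if PySem.Chars.find l [')'] ≠ -1 then t ++ l else t ++ l ++ ['|','|']) [])
              (some (-3)) none = ['|','|',')'] then
            PySem.List.slice ((buf ++ [line]).foldl (fun t l =>
              if PySem.Chars.find l [')'] ≠ -1 then t ++ l else t ++ l ++ ['|','|']) [])
              none (some (-3)) ++ [')']
          else ((buf ++ [line]).foldl (fun t l =>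
              if PySem.Chars.find l [')'] ≠ -1 then t ++ l else t ++ l ++ ['|','|']) []))
          = pvFmt (buf ++ [line]) := by
        rw [pv_inner_join buf _ hbuf hp]
        simp only [pvFmt]
        by_cases hs : PySem.Chars.endswith (PySem.Chars.join ['|','|']
            (buf ++ [line])) ['|','|',')'] = true
        · rw [if_pos ((pv_slice_eq_endswith _).mpr hs), if_pos hs]
        · rw [if_neg (fun hcon => hs ((pv_slice_eq_endswith _).mp hcon)), if_neg hs]
      rw [hflush]
      have := ih (gs ++ [buf ++ [line]]) [] (by intro l hl; cases hl)
      simpa using this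

-- find: first occurrence of a single character
lemma pv_findgo_first (c : Char) (a b : List Char) (k : Nat) (h : c ∉ a) :
    PySem.Chars.find.go [c] (a ++ c :: b) k = (k : Int) + a.length := by
  induction a generalizing k with
  | nil =>
    rw [List.nil_append, PySem.Chars.find.go]
    simp [List.isPrefixOf]
  | cons x t ih =>
    simp only [List.mem_cons, not_or] at h
    rw [List.cons_append, PySem.Chars.find.go]
    simp only [List.isPrefixOf, Bool.and_eq_true, beq_iff_eq]
    rw [if_neg (by simp [h.1])]
    rw [ih (k + 1) h.2]
    simp only [List.length_cons]
    push_cast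
    ring

lemma pv_find_none (c : Char) (a : List Char) (h : c ∉ a) :
    PySem.Chars.find a [c] = -1 := by
  rw [PySem.Chars.find_eq_neg_one_iff]
  intro hc
  exact h ((List.singleton_infix_iff c a).mp hc)

lemma pv_find_first (c : Char) (a b : List Char) (h : c ∉ a) :
    PySem.Chars.find (a ++ c :: b) [c] = (a.length : Int) := by
  have := pv_findgo_first c a b 0 h
  simpa [PySem.Chars.find] using this

-- replace: '\n' -> '||' on a '\n'-join is the '||'-join
lemma pv_replacego_nil (c : Char) (nw : List Char) (fuel : Nat) (acc : List Char) :
    PySem.Chars.replace.go [c] nw fuel [] acc = acc.reverse := by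
  cases fuel <;> simp [PySem.Chars.replace.go]

lemma pv_replacego_sep (c : Char) (nw : List Char) (r acc : List Char) (fuel : Nat) :
    PySem.Chars.replace.go [c] nw (fuel + 1) (c :: r) acc
      = PySem.Chars.replace.go [c] nw fuel r (nw.reverse ++ acc) := by
  rw [PySem.Chars.replace.go]
  simp [List.isPrefixOf]

lemma pv_replacego_clean (c : Char) (nw : List Char) (a r acc : List Char) (fuel : Nat)
    (h : c ∉ a) :
    PySem.Chars.replace.go [c] nw (a.length + fuel) (a ++ r) acc
      = PySem.Chars.replace.go [c] nw fuel r (a.reverse ++ acc) := by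
  induction a generalizing acc fuel with
  | nil => simp
  | cons x t ih =>
    simp only [List.mem_cons, not_or] at h
    have : (x :: t).length + fuel = (t.length + fuel) + 1 := by simp; omega
    rw [this, List.cons_append, PySem.Chars.replace.go]
    simp only [List.isPrefixOf, Bool.and_eq_true, beq_iff_eq]
    rw [if_neg (by simp [h.1])]
    rw [ih (x :: acc) fuel h.2]
    simp

lemma pv_replace_join (c : Char) (nw : List Char) (g : List (List Char)) (acc : List Char)
    (h : ∀ x ∈ g, c ∉ x) :
    PySem.Chars.replace.go [c] nw (PySem.Chars.join [c] g).length (PySem.Chars.join [c] g) acc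
      = acc.reverse ++ PySem.Chars.join nw g := by
  induction g generalizing acc with
  | nil => simp [PySem.Chars.join_nil, pv_replacego_nil]
  | cons x t ih =>
    cases t with
    | nil =>
      rw [PySem.Chars.join_singleton, PySem.Chars.join_singleton]
      have := pv_replacego_clean c nw x [] acc 0 (h x (by simp))
      simpa [pv_replacego_nil] using this
    | cons y ts =>
      rw [PySem.Chars.join_cons_cons, PySem.Chars.join_cons_cons]
      have hlen : (x ++ [c] ++ PySem.Chars.join [c] (y :: ts)).length
          = x.length + ((PySem.Chars.join [c] (y :: ts)).length + 1) := by simp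
      rw [hlen]
      have hx : c ∉ x := h x (by simp)
      rw [List.append_assoc, pv_replacego_clean c nw x _ acc _ hx]
      simp only [List.singleton_append]
      rw [pv_replacego_sep]
      rw [ih (nw.reverse ++ (x.reverse ++ acc)) (fun z hz => h z (by simp [hz]))]
      simp

lemma pv_replace_join' (c : Char) (nw : List Char) (g : List (List Char))
    (h : ∀ x ∈ g, c ∉ x) :
    PySem.Chars.replace (PySem.Chars.join [c] g) [c] nw = PySem.Chars.join nw g := by
  have := pv_replace_join c nw g [] h
  simpa [PySem.Chars.replace] using this

-- splitOn: no piece contains the (single-character) separator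
lemma pv_splitOngo_clean (c : Char) (l : List Char) (fuel : Nat) (cur : List Char)
    (acc : List (List Char)) (hf : l.length < fuel) (hcur : c ∉ cur)
    (hacc : ∀ x ∈ acc, c ∉ x) :
    ∀ x ∈ PySem.Chars.splitOn.go [c] fuel l cur acc, c ∉ x := by
  induction l generalizing fuel cur acc with
  | nil =>
    intro x hx
    cases fuel with
    | zero => omega
    | succ f =>
      rw [PySem.Chars.splitOn.go] at hx
      · simp only [List.mem_reverse, List.mem_cons] at hx
        rcases hx with h | h
        · subst h; simpa using hcur
        · exact hacc x h
      · omega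
  | cons y t ih =>
    intro x hx
    cases fuel with
    | zero => omega
    | succ f =>
      rw [PySem.Chars.splitOn.go] at hx
      by_cases hyc : y = c
      · subst hyc
        rw [if_pos (by simp [List.isPrefixOf])] at hx
        simp only [List.length_singleton, List.drop_one, List.tail_cons] at hx
        exact ih f [] (cur.reverse :: acc) (by simp at hf; omega) (by simp)
          (by intro z hz; rcases List.mem_cons.mp hz with h | h
              · subst h; simpa using hcur
              · exact hacc z h) x hx
      · rw [if_neg (by simp [List.isPrefixOf]; exact fun hc => absurd hc.symm hyc)] at hx
        exact ih f (y :: cur) acc (by simp at hf ⊢; omega)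
          (by simp [hcur]; exact fun hh => hyc hh.symm) hacc x hx

lemma pv_splitOn_clean (c : Char) (s : List Char) :
    ∀ x ∈ PySem.Chars.splitOn s [c], c ∉ x := by
  have := pv_splitOngo_clean c s (s.length + 1) [] [] (by omega) (by simp) (by simp)
  simpa [PySem.Chars.splitOn] using this

lemma pv_strip_subset (x : List Char) : ∀ a ∈ PySem.Chars.strip x, a ∈ x := by
  intro a ha
  simp only [PySem.Chars.strip, PySem.Chars.rstrip, PySem.Chars.lstrip] at ha
  rw [List.mem_reverse] at ha
  have h1 := List.dropWhile_sublist (l := (List.dropWhile PySem.Chars.isspace x).reverse)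
    (p := PySem.Chars.isspace)
  have h2 := List.dropWhile_sublist (l := x) (p := PySem.Chars.isspace)
  have := h1.mem ha
  rw [List.mem_reverse] at this
  exact h2.mem this

-- join decomposition
lemma pv_join_last (c : Char) (pre : List (List Char)) (d : List Char) :
    PySem.Chars.join [c] (pre ++ [d])
      = (if pre.isEmpty then [] else PySem.Chars.join [c] pre ++ [c]) ++ d := by
  induction pre with
  | nil => simp [PySem.Chars.join_singleton]
  | cons x t ih =>
    cases t with
    | nil => simp [PySem.Chars.join_cons_cons, PySem.Chars.join_singleton]
    | cons y ts =>
      simp only [List.cons_append] at ih ⊢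
      rw [PySem.Chars.join_cons_cons, ih, PySem.Chars.join_cons_cons]
      simp

lemma pv_join_append (c : Char) (pre : List (List Char)) (d : List Char)
    (rest : List (List Char)) :
    PySem.Chars.join [c] (pre ++ d :: rest)
      = PySem.Chars.join [c] (pre ++ [d]) ++
        (if rest.isEmpty then [] else c :: PySem.Chars.join [c] rest) := by
  induction pre with
  | nil =>
    cases rest with
    | nil => simp [PySem.Chars.join_singleton]
    | cons y ts => simp [PySem.Chars.join_cons_cons, PySem.Chars.join_singleton]
  | cons x t ih =>
    cases t with
    | nil =>
      cases rest with
      | nil => simp [PySem.Chars.join_cons_cons, PySem.Chars.join_singleton]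
      | cons y ts =>
        simp only [List.cons_append, List.nil_append]
        rw [PySem.Chars.join_cons_cons, PySem.Chars.join_cons_cons,
          PySem.Chars.join_cons_cons, PySem.Chars.join_singleton]
        simp
    | cons z zs =>
      simp only [List.cons_append] at ih ⊢
      rw [PySem.Chars.join_cons_cons, ih, PySem.Chars.join_cons_cons]
      simp

lemma pv_mem_join (c : Char) (g : List (List Char)) (a : Char)
    (ha : a ∈ PySem.Chars.join [c] g) : a = c ∨ ∃ x ∈ g, a ∈ x := by
  induction g with
  | nil => simp [PySem.Chars.join_nil] at ha
  | cons x t ih =>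
    cases t with
    | nil =>
      rw [PySem.Chars.join_singleton] at ha
      exact Or.inr ⟨x, by simp, ha⟩
    | cons y ts =>
      rw [PySem.Chars.join_cons_cons] at ha
      simp only [List.mem_append, List.mem_singleton] at ha
      rcases ha with (h | h) | h
      · exact Or.inr ⟨x, by simp, h⟩
      · exact Or.inl h
      · rcases ih h with h' | ⟨z, hz, haz⟩
        · exact Or.inl h'
        · exact Or.inr ⟨z, by simp [hz], haz⟩

-- grouping facts
lemma pv_grp_clean (ls : List (List Char)) (gs : List (List (List Char)))
    (buf : List (List Char)) (h : ∀ l ∈ ls, PySem.Chars.find l [')'] = -1) :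
    ls.foldl pvGrpStep (gs, buf) = (gs, buf ++ ls) := by
  induction ls generalizing buf with
  | nil => simp
  | cons x t ih =>
    simp only [List.foldl_cons, pvGrpStep, h x (by simp), ne_eq, not_true_eq_false, if_false]
    rw [ih (buf ++ [x]) (fun l hl => h l (by simp [hl]))]
    simp

lemma pv_grp_shift (ls : List (List Char)) (gs : List (List (List Char)))
    (buf : List (List Char)) :
    ls.foldl pvGrpStep (gs, buf)
      = (gs ++ (ls.foldl pvGrpStep ([], buf)).1, (ls.foldl pvGrpStep ([], buf)).2) := by
  induction ls generalizing gs buf with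
  | nil => simp
  | cons x t ih =>
    simp only [List.foldl_cons, pvGrpStep]
    by_cases hx : PySem.Chars.find x [')'] = -1
    · simp only [hx, ne_eq, not_true_eq_false, if_false]
      exact ih gs (buf ++ [x])
    · simp only [hx, ne_eq, not_false_eq_true, if_true]
      simp only [List.nil_append]
      rw [ih (gs ++ [buf ++ [x]]) [], ih [buf ++ [x]] []]
      simp

-- first-hit decomposition of a list
lemma pv_first_split {α : Type} (p : α → Prop) [DecidablePred p] (ls : List α)
    (h : ∃ x ∈ ls, p x) :
    ∃ pre d rest, ls = pre ++ d :: rest ∧ (∀ x ∈ pre, ¬ p x) ∧ p d := by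
  induction ls with
  | nil => simp at h
  | cons x t ih =>
    by_cases hx : p x
    · exact ⟨[], x, t, by simp, by simp, hx⟩
    · obtain ⟨z, hz, hpz⟩ := h
      rcases List.mem_cons.mp hz with rfl | hzt
      · exact absurd hpz hx
      · obtain ⟨pre, d, rest, heq, hpre, hd⟩ := ih ⟨z, hzt, hpz⟩
        exact ⟨x :: pre, d, rest, by simp [heq],
          by intro w hw; rcases List.mem_cons.mp hw with rfl | hw'
             · exact hx
             · exact hpre w hw', hd⟩

-- one iteration of B's scan consumes exactly one group of the line list
lemma pv_scanB_step (fuel : Nat) (pre : List (List Char)) (d : List Char)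
    (rest : List (List Char)) (out : List String)
    (hnl : ∀ x ∈ pre ++ d :: rest, '\n' ∉ x)
    (hpre : ∀ x ∈ pre, ')' ∉ x) (hd : ')' ∈ d) :
    pvScanB (fuel + 1) (PySem.Chars.join ['\n'] (pre ++ d :: rest)) out
      = pvScanB fuel (PySem.Chars.join ['\n'] rest)
          (out ++ [String.ofList (pvFmt (pre ++ [d]))]) := by
  obtain ⟨d1, ch, d2, hdsplit, hd1, hch⟩ := pv_first_split (fun x => x = ')') d ⟨')', hd, rfl⟩
  subst hch
  set c : Char := '\n' with hc
  set w : List Char := if pre.isEmpty then [] else PySem.Chars.join [c] pre ++ [c] with hw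
  set t : List Char := PySem.Chars.join [c] (pre ++ d :: rest) with htdef
  set tail : List Char := if rest.isEmpty then [] else c :: PySem.Chars.join [c] rest with htail
  have ht : t = (w ++ d) ++ tail := by
    rw [htdef, pv_join_append, pv_join_last]
  have hwnr : ')' ∉ w := by
    rw [hw]
    split
    · simp
    · intro hmem
      rcases List.mem_append.mp hmem with h | h
      · rcases pv_mem_join c pre ')' h with h' | ⟨x, hx, hx'⟩
        · exact absurd h' (by decide)
        · exact hpre x hx hx'
      · simp at h; exact absurd h (by decide)
  have hdn : c ∉ d := hnl d (by simp)
  have hta : t = (w ++ d1) ++ (')' :: (d2 ++ tail)) := by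
    rw [ht, hdsplit]; simp
  have hd1r : ')' ∉ w ++ d1 := by
    intro hmem
    rcases List.mem_append.mp hmem with h | h
    · exact hwnr h
    · exact hd1 ')' h rfl
  have hN : PySem.Chars.find t [')'] = ((w ++ d1).length : Int) := by
    rw [hta]; exact pv_find_first ')' (w ++ d1) (d2 ++ tail) hd1r
  have hNle : (w ++ d1).length ≤ t.length := by
    rw [hta]; simp
  have hdropN : t.drop (w ++ d1).length = ')' :: (d2 ++ tail) := by
    rw [hta]; exact List.drop_left
  have hd2n : c ∉ ')' :: d2 := by
    intro hmem
    rcases List.mem_cons.mp hmem with h | h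
    · exact absurd h (by decide)
    · exact hdn (by rw [hdsplit]; simp [h])
  have hclean : ∀ x ∈ pre ++ [d], c ∉ x := by
    intro x hx
    rcases List.mem_append.mp hx with h | h
    · exact hnl x (by simp [h])
    · simp at h; subst h; exact hdn
  rw [pvScanB]
  rw [hN]
  rw [if_neg (by omega)]
  have hFF := PySem.Chars.findFrom_natCast t [c] (w ++ d1).length hNle
  rw [hdropN] at hFF
  cases rest with
  | nil =>
    have htail0 : tail = [] := by rw [htail]; simp
    have hfindnl : PySem.Chars.find (')' :: (d2 ++ tail)) [c] = -1 := by
      rw [htail0, List.append_nil]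
      exact pv_find_none c _ hd2n
    rw [hfindnl, if_pos rfl] at hFF
    rw [hFF]
    norm_num
    have hsl : PySem.List.slice t (some ((t.length : Int) + 1)) none = [] := by
      rw [show ((t.length : Int) + 1) = ((t.length + 1 : Nat) : Int) by omega]
      rw [PySem.List.slice_from t (by positivity)]
      simp
    rw [hsl, htdef, pv_replace_join' c ['|','|'] (pre ++ [d]) hclean]
    simp only [pvFmt]
  | cons y ys =>
    have htail' : tail = c :: PySem.Chars.join [c] (y :: ys) := by rw [htail]; simp
    have hfindnl : PySem.Chars.find (')' :: (d2 ++ tail)) [c] = (((')' :: d2).length : Nat) : Int) := by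
      rw [htail', show (')' :: (d2 ++ (c :: PySem.Chars.join [c] (y :: ys))))
        = (')' :: d2) ++ c :: PySem.Chars.join [c] (y :: ys) by simp]
      exact pv_find_first c (')' :: d2) _ hd2n
    rw [hfindnl, if_neg (by omega)] at hFF
    have hM : ((w ++ d1).length : Int) + (((')' :: d2).length : Nat) : Int) = ((w ++ d).length : Int) := by
      rw [hdsplit]; simp; ring
    rw [hM] at hFF
    rw [hFF]
    norm_num
    rw [if_neg (show ¬((w.length : Int) + (d.length : Int) = -1) by omega)]
    have hlen : ((w.length : Int) + (d.length : Int)) = (((w ++ d).length : Nat) : Int) := by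
      simp
    rw [hlen]
    have hs1 : PySem.List.slice t none (some (((w ++ d).length : Nat) : Int)) = w ++ d := by
      rw [PySem.List.slice_to t (by positivity)]
      rw [Int.toNat_natCast]
      rw [ht, htail']
      exact List.take_left
    have hs2 : PySem.List.slice t (some ((((w ++ d).length : Nat) : Int) + 1)) none
        = PySem.Chars.join [c] (y :: ys) := by
      rw [show ((((w ++ d).length : Nat) : Int) + 1) = (((w ++ d).length + 1 : Nat) : Int) by omega]
      rw [PySem.List.slice_from t (by positivity)]
      rw [Int.toNat_natCast]
      rw [ht, htail']
      rw [show w ++ d ++ c :: PySem.Chars.join [c] (y :: ys)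
        = (w ++ d ++ [c]) ++ PySem.Chars.join [c] (y :: ys) by simp]
      rw [show (w ++ d).length + 1 = (w ++ d ++ [c]).length by simp; omega]
      exact List.drop_left
    rw [hs1, hs2]
    have hu := pv_join_last c pre d
    rw [← hw] at hu
    rw [← hu, pv_replace_join' c ['|','|'] (pre ++ [d]) hclean]
    simp only [pvFmt]

-- B's scan over the '\n'-join of the lines produces the formatted groups
lemma pv_scanB_main (fuel : Nat) (ls : List (List Char)) (out : List String)
    (hnl : ∀ x ∈ ls, '\n' ∉ x) (hf : (PySem.Chars.join ['\n'] ls).length < fuel) :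
    pvScanB fuel (PySem.Chars.join ['\n'] ls) out
      = out ++ ((pvGrp ls).1).map (fun g => String.ofList (pvFmt g)) := by
  induction fuel generalizing ls out with
  | zero => omega
  | succ f ih =>
    by_cases hex : ∃ x ∈ ls, ')' ∈ x
    · obtain ⟨pre, d, rest, rfl, hpre, hd⟩ := pv_first_split (fun x => ')' ∈ x) ls hex
      rw [pv_scanB_step f pre d rest out hnl hpre hd]
      have hdne : d ≠ [] := by intro h; rw [h] at hd; simp at hd
      have hrlen : (PySem.Chars.join ['\n'] rest).length < f := by
        rw [pv_join_append '\n' pre d rest, pv_join_last '\n' pre d] at hf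
        cases rest with
        | nil => simp only [PySem.Chars.join_nil, List.length_nil]
                 have : 1 ≤ d.length := List.length_pos_iff.mpr hdne
                 simp at hf; omega
        | cons y ys =>
          simp only [List.isEmpty_cons] at hf
          have : 1 ≤ d.length := List.length_pos_iff.mpr hdne
          simp at hf
          omega
      rw [ih rest _ (fun x hx => hnl x (by simp [hx])) hrlen]
      have hgrp : (pvGrp (pre ++ d :: rest)).1 = (pre ++ [d]) :: (pvGrp rest).1 := by
        unfold pvGrp
        rw [List.foldl_append, pv_grp_clean pre [] []
          (fun l hl => pv_find_none ')' l (hpre l hl)), List.foldl_cons]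
        have hfd : PySem.Chars.find d [')'] ≠ -1 := by
          intro hcon
          rw [PySem.Chars.find_eq_neg_one_iff] at hcon
          exact hcon ((List.singleton_infix_iff ')' d).mpr hd)
        have hstep : pvGrpStep ([], [] ++ pre) d = ([[] ++ pre ++ [d]], []) := by
          simp only [pvGrpStep]
          rw [if_pos hfd]
          simp
        rw [hstep, pv_grp_shift rest [[] ++ pre ++ [d]] []]
        simp
      rw [hgrp]
      simp
    · have hex' : ∀ x ∈ ls, ')' ∉ x := fun x hx hc => hex ⟨x, hx, hc⟩
      have hfind : PySem.Chars.find (PySem.Chars.join ['\n'] ls) [')'] = -1 := by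
        apply pv_find_none
        intro hmem
        rcases pv_mem_join '\n' ls ')' hmem with h | ⟨x, hx, hx'⟩
        · exact absurd h (by decide)
        · exact hex' x hx hx'
      rw [pvScanB, hfind, if_pos rfl]
      rw [show pvGrp ls = ([], [] ++ ls) from pv_grp_clean ls [] []
        (fun l hl => pv_find_none ')' l (hex' l hl))]
      simp

-- ===== VERDICT (by name: the statement is the Claim_ definition above) =====
theorem convert_content_spec : Claim_equal_convert_content := by
  intro input_text _
  unfold Spec_convert_content convert_content convert_content_alt
  set lines := PySem.Chars.splitOn (PySem.Chars.strip input_text.toList) ['\n'] with hlines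
  set ls := lines.map PySem.Chars.strip with hls
  have hnl : ∀ x ∈ ls, '\n' ∉ x := by
    intro x hx
    rw [hls] at hx
    obtain ⟨y, hy, rfl⟩ := List.mem_map.mp hx
    intro hmem
    exact pv_splitOn_clean '\n' (PySem.Chars.strip input_text.toList) y hy
      (pv_strip_subset y '\n' hmem)
  -- A: rewrite the stripped-inside fold as a fold over the stripped lines
  have hAfold : ∀ (init : List (List Char) × List (List Char) × List Char),
      lines.foldl (fun st line =>
        let clean := PySem.Chars.strip line
        if PySem.Chars.find clean [')'] ≠ -1 then
          let tmpLines := st.2.1 ++ [clean]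
          let tmp := tmpLines.foldl (fun t l =>
            if PySem.Chars.find l [')'] ≠ -1 then t ++ l else t ++ l ++ ['|','|']) st.2.2
          let tmp := if PySem.List.slice tmp (some (-3)) none = ['|','|',')'] then
              PySem.List.slice tmp none (some (-3)) ++ [')'] else tmp
          (st.1 ++ [PySem.Chars.strip tmp], ([] : List (List Char)), ([] : List Char))
        else
          (st.1, st.2.1 ++ [clean], st.2.2)) init
      = ls.foldl (fun st line =>
        if PySem.Chars.find line [')'] ≠ -1 then
          let tmpLines := st.2.1 ++ [line]
          let tmp := tmpLines.foldl (fun t l =>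
            if PySem.Chars.find l [')'] ≠ -1 then t ++ l else t ++ l ++ ['|','|']) st.2.2
          let tmp := if PySem.List.slice tmp (some (-3)) none = ['|','|',')'] then
              PySem.List.slice tmp none (some (-3)) ++ [')'] else tmp
          (st.1 ++ [PySem.Chars.strip tmp], ([] : List (List Char)), ([] : List Char))
        else
          (st.1, st.2.1 ++ [line], st.2.2)) init := by
    intro init
    rw [hls, List.foldl_map]
  have hA := pv_loopA ls [] [] (by intro l hl; cases hl)
  simp only [List.map_nil] at hA
  have hB := pv_scanB_main ((PySem.Chars.join ['\n'] ls).length + 1) ls [] hnl (by omega)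
  simp only [hAfold, hA, hB, List.map_map, List.nil_append]
  rfl
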